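-- pv_equiv track=rewrite | github.com/BinaryBridges/Crowd-Vision | app/convex.py | build_gender_distribution_payload
-- ===== SOURCE A (Python) =====
-- def build_gender_distribution_payload(faces_data: list) -> dict:
--     """
--     Build gender distribution by age group payload in Convex format.
--
--     Args:
--         faces_data: List of face data dictionaries
--
--     Returns:
--         Dictionary with gender distribution by age in format:
--         {g0_10: {male: count, female: count, unknown: count}, ...}
--
--     """
--     gender_distribution = {
--         "g0_10": {"male": 0, "female": 0, "unknown": 0},
--         "g11_20": {"male": 0, "female": 0, "unknown": 0},
--         "g21_30": {"male": 0, "female": 0, "unknown": 0},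
--         "g31_40": {"male": 0, "female": 0, "unknown": 0},
--         "g41_50": {"male": 0, "female": 0, "unknown": 0},
--         "g51_60": {"male": 0, "female": 0, "unknown": 0},
--         "g61_70": {"male": 0, "female": 0, "unknown": 0},
--         "g71_80": {"male": 0, "female": 0, "unknown": 0},
--         "g81_90": {"male": 0, "female": 0, "unknown": 0},
--         "g91_100": {"male": 0, "female": 0, "unknown": 0},
--         "g101": {"male": 0, "female": 0, "unknown": 0},
--     }
--
--     for face in faces_data:
--         age_str = face.get("age", "")
--         gender = face.get("gender", "").strip().upper()
--
--         if age_str and age_str.strip():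
--             try:
--                 age = int(age_str)
--                 if 0 <= age <= 120:
--                     # Determine age bracket
--                     if age < 10:
--                         bracket = "g0_10"
--                     elif age < 20:
--                         bracket = "g11_20"
--                     elif age < 30:
--                         bracket = "g21_30"
--                     elif age < 40:
--                         bracket = "g31_40"
--                     elif age < 50:
--                         bracket = "g41_50"
--                     elif age < 60:
--                         bracket = "g51_60"
--                     elif age < 70:
--                         bracket = "g61_70"
--                     elif age < 80:
--                         bracket = "g71_80"
--                     elif age < 90:
--                         bracket = "g81_90"
--                     elif age < 100:
--                         bracket = "g91_100"
--                     else: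
--                         bracket = "g101"
--
--                     # Increment appropriate gender count
--                     if gender == "M":
--                         gender_distribution[bracket]["male"] += 1
--                     elif gender == "F":
--                         gender_distribution[bracket]["female"] += 1
--                     else:
--                         gender_distribution[bracket]["unknown"] += 1
--             except (ValueError, TypeError):
--                 pass
--
--     return gender_distribution
-- ===== SOURCE B (Python) =====
-- _LABELS = ["g0_10", "g11_20", "g21_30", "g31_40", "g41_50", "g51_60",
--            "g61_70", "g71_80", "g81_90", "g91_100", "g101"]
-- _GENDERS = ("male", "female", "unknown")
--
--
-- def _classify(face):
--     """Return (bracket_label, gender_key) for a countable face, else None."""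
--     age_str = face.get("age", "")
--     gender = face.get("gender", "").strip().upper()
--     if age_str and age_str.strip():
--         try:
--             age = int(age_str)
--         except (ValueError, TypeError):
--             return None
--         if 0 <= age <= 120:
--             bracket = _LABELS[min(age // 10, 10)]
--             key = "male" if gender == "M" else ("female" if gender == "F" else "unknown")
--             return (bracket, key)
--     return None
--
--
-- def build_gender_distribution_payload(faces_data: list) -> dict:
--     # Pass 1: flat list of (bracket, gender_key) tally keys.
--     keys = []
--     for face in faces_data:
--         k = _classify(face)
--         if k is not None:
--             keys.append(k)
--     # Pass 2: flat count table.
--     counts = {}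
--     for k in keys:
--         counts[k] = counts.get(k, 0) + 1
--     # Pass 3: reshape into the nested payload.
--     return {br: {g: counts.get((br, g), 0) for g in _GENDERS} for br in _LABELS}
-- ===== Notes on version B (the rewrite author's own statement) =====
-- stated objective: alternative
-- what changed: A fills the nested bracket->gender dict in place during a single pass with an 11-way if-chain; B separates the phases: classify each face to a (bracket, gender) key via min(age//10,10) indexing a label table, count the flat keys in one table, then reshape the table into the nested payload.
import Mathlib
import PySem

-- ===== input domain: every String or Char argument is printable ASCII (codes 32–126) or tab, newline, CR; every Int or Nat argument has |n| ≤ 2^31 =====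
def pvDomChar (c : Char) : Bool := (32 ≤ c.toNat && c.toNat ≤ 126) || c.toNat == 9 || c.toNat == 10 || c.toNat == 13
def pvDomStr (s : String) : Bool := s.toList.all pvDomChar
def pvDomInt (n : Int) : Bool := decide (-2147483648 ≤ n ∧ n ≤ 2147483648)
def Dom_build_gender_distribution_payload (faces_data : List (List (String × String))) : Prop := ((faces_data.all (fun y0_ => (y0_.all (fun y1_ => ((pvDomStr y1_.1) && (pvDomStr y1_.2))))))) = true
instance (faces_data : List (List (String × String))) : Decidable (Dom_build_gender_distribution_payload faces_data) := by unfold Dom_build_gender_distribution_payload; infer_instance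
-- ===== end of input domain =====

-- B replaces A's write-into-nested-dict single pass by classify -> flat count table -> reshape (alternative decomposition, same cost).


-- ===== PORT A =====
-- The bracket label is always a key of the initial dict, so `gender_distribution[bracket][g] += 1`
-- (getitem then in-place +=, never a KeyError here) is ported exactly by Dict.modify (its default is never used).
def build_gender_distribution_payload (faces_data : List (List (String × String))) : List (String × List (String × Int)) :=
  let gd : PySem.Dict String (PySem.Dict String Int) := PySem.Dict.mk
    [("g0_10",   PySem.Dict.mk [("male", 0), ("female", 0), ("unknown", 0)]),
     ("g11_20",  PySem.Dict.mk [("male", 0), ("female", 0), ("unknown", 0)]),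
     ("g21_30",  PySem.Dict.mk [("male", 0), ("female", 0), ("unknown", 0)]),
     ("g31_40",  PySem.Dict.mk [("male", 0), ("female", 0), ("unknown", 0)]),
     ("g41_50",  PySem.Dict.mk [("male", 0), ("female", 0), ("unknown", 0)]),
     ("g51_60",  PySem.Dict.mk [("male", 0), ("female", 0), ("unknown", 0)]),
     ("g61_70",  PySem.Dict.mk [("male", 0), ("female", 0), ("unknown", 0)]),
     ("g71_80",  PySem.Dict.mk [("male", 0), ("female", 0), ("unknown", 0)]),
     ("g81_90",  PySem.Dict.mk [("male", 0), ("female", 0), ("unknown", 0)]),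
     ("g91_100", PySem.Dict.mk [("male", 0), ("female", 0), ("unknown", 0)]),
     ("g101",    PySem.Dict.mk [("male", 0), ("female", 0), ("unknown", 0)])]
  let gd := faces_data.foldl (fun gd face =>
    let age_str := (PySem.Dict.mk face).getD "age" ""
    let gender := PySem.Str.upper (PySem.Str.strip ((PySem.Dict.mk face).getD "gender" ""))
    if age_str ≠ "" ∧ PySem.Str.strip age_str ≠ "" then
      (match PySem.Int.ofStr? age_str with
       | none => gd
       | some age =>
         if 0 ≤ age ∧ age ≤ 120 then
           let bracket :=
             if age < 10 then "g0_10"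
             else if age < 20 then "g11_20"
             else if age < 30 then "g21_30"
             else if age < 40 then "g31_40"
             else if age < 50 then "g41_50"
             else if age < 60 then "g51_60"
             else if age < 70 then "g61_70"
             else if age < 80 then "g71_80"
             else if age < 90 then "g81_90"
             else if age < 100 then "g91_100"
             else "g101"
           if gender = "M" then
             gd.modify bracket PySem.Dict.empty (fun inner => inner.modify "male" 0 (· + 1))
           else if gender = "F" then
             gd.modify bracket PySem.Dict.empty (fun inner => inner.modify "female" 0 (· + 1))
           else
             gd.modify bracket PySem.Dict.empty (fun inner => inner.modify "unknown" 0 (· + 1))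
         else gd)
    else gd) gd
  gd.items.map (fun p => (p.1, p.2.items))

-- ===== PORT B =====
def pvLabels : List String :=
  ["g0_10", "g11_20", "g21_30", "g31_40", "g41_50", "g51_60",
   "g61_70", "g71_80", "g81_90", "g91_100", "g101"]

def pvGenders : List String := ["male", "female", "unknown"]

def pvClassify (face : List (String × String)) : Option (String × String) :=
  let age_str := (PySem.Dict.mk face).getD "age" ""
  let gender := PySem.Str.upper (PySem.Str.strip ((PySem.Dict.mk face).getD "gender" ""))
  if age_str ≠ "" ∧ PySem.Str.strip age_str ≠ "" then
    (match PySem.Int.ofStr? age_str with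
     | none => none
     | some age =>
       if 0 ≤ age ∧ age ≤ 120 then
         some (PySem.List.pyGetD pvLabels (min (PySem.Int.floordiv age 10) 10) "",
               if gender = "M" then "male" else if gender = "F" then "female" else "unknown")
       else none)
  else none

def build_gender_distribution_payload_alt (faces_data : List (List (String × String))) : List (String × List (String × Int)) :=
  let keys := faces_data.foldl (fun acc face =>
    match pvClassify face with
    | some k => acc ++ [k]
    | none => acc) []
  let counts := keys.foldl (fun d k => d.insert k (d.getD k 0 + 1))
    (PySem.Dict.empty : PySem.Dict (String × String) Int)
  pvLabels.map (fun br => (br, pvGenders.map (fun g => (g, counts.getD (br, g) 0))))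

-- ===== PRECONDITION & SPEC =====
def Spec_build_gender_distribution_payload (faces_data : List (List (String × String))) (out : List (String × List (String × Int))) : Prop := out = build_gender_distribution_payload_alt faces_data
instance (faces_data : List (List (String × String))) (out : List (String × List (String × Int))) : Decidable (Spec_build_gender_distribution_payload faces_data out) := by unfold Spec_build_gender_distribution_payload; infer_instance

-- ===== CLAIM (what is proved, stated in full; the proofs are below) =====
def Claim_equal_build_gender_distribution_payload : Prop := ∀ (faces_data : List (List (String × String))), Dom_build_gender_distribution_payload faces_data → Spec_build_gender_distribution_payload faces_data (build_gender_distribution_payload faces_data)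

-- ===== LEMMAS AND PROOFS =====

-- A's loop body, named so the lemmas can speak about one step (definitionally the lambda in the port).
def pvAStep (gd : PySem.Dict String (PySem.Dict String Int)) (face : List (String × String)) :
    PySem.Dict String (PySem.Dict String Int) :=
    let age_str := (PySem.Dict.mk face).getD "age" ""
    let gender := PySem.Str.upper (PySem.Str.strip ((PySem.Dict.mk face).getD "gender" ""))
    if age_str ≠ "" ∧ PySem.Str.strip age_str ≠ "" then
      (match PySem.Int.ofStr? age_str with
       | none => gd
       | some age =>
         if 0 ≤ age ∧ age ≤ 120 then
           let bracket :=
             if age < 10 then "g0_10"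
             else if age < 20 then "g11_20"
             else if age < 30 then "g21_30"
             else if age < 40 then "g31_40"
             else if age < 50 then "g41_50"
             else if age < 60 then "g51_60"
             else if age < 70 then "g61_70"
             else if age < 80 then "g71_80"
             else if age < 90 then "g81_90"
             else if age < 100 then "g91_100"
             else "g101"
           if gender = "M" then
             gd.modify bracket PySem.Dict.empty (fun inner => inner.modify "male" 0 (· + 1))
           else if gender = "F" then
             gd.modify bracket PySem.Dict.empty (fun inner => inner.modify "female" 0 (· + 1))
           else
             gd.modify bracket PySem.Dict.empty (fun inner => inner.modify "unknown" 0 (· + 1))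
         else gd)
    else gd

-- A's nested dict, abstracted over the per-cell counts.
def pvDictOf (c : String × String → Int) : PySem.Dict String (PySem.Dict String Int) :=
  PySem.Dict.mk (pvLabels.map (fun br => (br,
    PySem.Dict.mk [("male", c (br, "male")), ("female", c (br, "female")), ("unknown", c (br, "unknown"))])))

theorem pvA_eq (faces_data : List (List (String × String))) :
    build_gender_distribution_payload faces_data
    = ((faces_data.foldl pvAStep (pvDictOf (fun _ => 0))).items.map (fun p => (p.1, p.2.items))) := rfl

theorem pvBracket_eq (age : Int) (h0 : 0 ≤ age) (h1 : age ≤ 120) :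
    (if age < 10 then "g0_10"
     else if age < 20 then "g11_20"
     else if age < 30 then "g21_30"
     else if age < 40 then "g31_40"
     else if age < 50 then "g41_50"
     else if age < 60 then "g51_60"
     else if age < 70 then "g61_70"
     else if age < 80 then "g71_80"
     else if age < 90 then "g81_90"
     else if age < 100 then "g91_100"
     else "g101")
    = PySem.List.pyGetD pvLabels (min (PySem.Int.floordiv age 10) 10) "" := by
  interval_cases age <;> decide

theorem pvModify_pvDictOf (c : String × String → Int) (br g : String)
    (hbr : br ∈ pvLabels) (hg : g ∈ pvGenders) :
    (pvDictOf c).modify br PySem.Dict.empty (fun inner => inner.modify g 0 (· + 1))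
    = pvDictOf (fun k => if k = (br, g) then c k + 1 else c k) := by
  fin_cases hbr <;> fin_cases hg <;>
    simp [pvDictOf, pvLabels, PySem.Dict.modify, PySem.Dict.insert, PySem.Dict.getD,
      PySem.Dict.get?, PySem.Dict.empty]

set_option maxHeartbeats 1000000 in
theorem pvStep_eq (s : PySem.Dict String (PySem.Dict String Int))
    (face : List (String × String)) :
    pvAStep s face
    = (match pvClassify face with
       | none => s
       | some k => s.modify k.1 PySem.Dict.empty (fun inner => inner.modify k.2 0 (· + 1))) := by
  unfold pvAStep pvClassify
  by_cases h1 : ((PySem.Dict.mk face).getD "age" "" ≠ "" ∧ PySem.Str.strip ((PySem.Dict.mk face).getD "age" "") ≠ "")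
  · simp only [if_pos h1]
    cases hof : PySem.Int.ofStr? ((PySem.Dict.mk face).getD "age" "") with
    | none => simp
    | some age =>
      simp only []
      by_cases h2 : (0 ≤ age ∧ age ≤ 120)
      · simp only [if_pos h2, pvBracket_eq age h2.1 h2.2]
        by_cases h3 : PySem.Str.upper (PySem.Str.strip ((PySem.Dict.mk face).getD "gender" "")) = "M"
        · simp [h3]
        · by_cases h4 : PySem.Str.upper (PySem.Str.strip ((PySem.Dict.mk face).getD "gender" "")) = "F" <;>
            simp [h3, h4]
      · simp [h2]
  · simp [if_neg h1]
theorem pvBracket_mem (age : Int) (h0 : 0 ≤ age) :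
    PySem.List.pyGetD pvLabels (min (PySem.Int.floordiv age 10) 10) "" ∈ pvLabels := by
  have hdiv : 0 ≤ PySem.Int.floordiv age 10 := by
    have := (PySem.Int.le_floordiv_iff_mul_le (a := age) (b := 10) (q := 0) (by omega)).2
    simpa using this (by omega)
  have h1i : min (PySem.Int.floordiv age 10) 10 ≤ 10 := min_le_right _ _
  have h0i : 0 ≤ min (PySem.Int.floordiv age 10) 10 := le_min hdiv (by omega)
  interval_cases h : min (PySem.Int.floordiv age 10) 10 <;> decide

set_option maxHeartbeats 1000000 in
theorem pvClassify_mem (face : List (String × String)) (br g : String)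
    (h : pvClassify face = some (br, g)) : br ∈ pvLabels ∧ g ∈ pvGenders := by
  unfold pvClassify at h
  by_cases h1 : ((PySem.Dict.mk face).getD "age" "" ≠ "" ∧ PySem.Str.strip ((PySem.Dict.mk face).getD "age" "") ≠ "")
  · rw [if_pos h1] at h
    cases hof : PySem.Int.ofStr? ((PySem.Dict.mk face).getD "age" "") with
    | none => rw [hof] at h; simp at h
    | some age =>
      rw [hof] at h
      dsimp only at h
      by_cases h2 : (0 ≤ age ∧ age ≤ 120)
      · rw [if_pos h2] at h
        simp only [Option.some.injEq, Prod.mk.injEq] at h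
        refine ⟨h.1 ▸ pvBracket_mem age h2.1, ?_⟩
        rw [← h.2]
        split_ifs <;> simp [pvGenders]
      · rw [if_neg h2] at h; simp at h
  · rw [if_neg h1] at h; simp at h
-- The invariant: running A's loop from pvDictOf c adds, cell by cell, the classify-key counts.
theorem pvInvariant (faces : List (List (String × String))) (c : String × String → Int) :
    faces.foldl pvAStep (pvDictOf c)
    = pvDictOf (fun k => c k + ((faces.filterMap pvClassify).count k : Int)) := by
  induction faces generalizing c with
  | nil => simp
  | cons f rest ih =>
    rw [List.foldl_cons, pvStep_eq (pvDictOf c) f]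
    cases hcl : pvClassify f with
    | none =>
      dsimp only
      rw [ih c]
      simp [hcl]
    | some k =>
      obtain ⟨br, g⟩ := k
      obtain ⟨hbr, hg⟩ := pvClassify_mem f br g hcl
      dsimp only
      rw [pvModify_pvDictOf c br g hbr hg, ih]
      congr 1
      funext k'
      simp only [List.filterMap_cons, hcl, List.count_cons]
      by_cases hk : k' = (br, g)
      · subst hk
        simp only [BEq.rfl, if_true]
        push_cast
        ring
      · rw [if_neg hk, beq_eq_false_iff_ne.2 (Ne.symm hk)]
        simp

theorem pvKeys_foldl (faces : List (List (String × String))) (acc : List (String × String)) :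
    faces.foldl (fun acc face =>
      match pvClassify face with
      | some k => acc ++ [k]
      | none => acc) acc = acc ++ faces.filterMap pvClassify := by
  induction faces generalizing acc with
  | nil => simp
  | cons f rest ih =>
    cases hcl : pvClassify f <;> simp [List.foldl_cons, hcl, ih]

theorem build_gender_distribution_payload_spec : Claim_equal_build_gender_distribution_payload := by
  intro faces _
  unfold Spec_build_gender_distribution_payload
  rw [pvA_eq, pvInvariant]
  unfold build_gender_distribution_payload_alt
  rw [pvKeys_foldl]
  simp only [List.nil_append, PySem.Dict.foldl_insert_getD_add_one_eq_counter,
    PySem.Dict.getD_counter]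
  simp [pvDictOf, pvGenders]
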